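-- pv_equiv track=rewrite | github.com/acmeism/RosettaCodeData | Task/Sailors-coconuts-and-a-monkey-problem/Python/sailors-coconuts-and-a-monkey-problem-2.py | wake_and_split
-- ===== SOURCE A (Python) =====
-- def wake_and_split(n0, sailors, depth=None):
--     if depth is None:
--         depth = sailors
--     portion, remainder = divmod(n0, sailors)
--     if portion <= 0 or remainder != (1 if depth else 0):
--         return None
--     else:
--         return n0 if not depth else wake_and_split(n0 - portion - remainder, sailors, depth - 1)
-- ===== SOURCE B (Python) =====
-- def wake_and_split(n0, sailors, depth=None):
--     if depth is None:
--         depth = sailors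
--     n = n0
--     while depth != 0:
--         if n % sailors != 1:
--             return None
--         q = (n - 1) // sailors
--         if q <= 0:
--             return None
--         n = q * (sailors - 1)
--         depth -= 1
--     if n % sailors == 0 and n // sailors > 0:
--         return n
--     return None
-- ===== Notes on version B (the rewrite author's own statement) =====
-- stated objective: alternative
-- what changed: Replaces A's self-recursion (rebuilding the pile via divmod and n - portion - remainder, returning the recursive call's value) by an iterative while-loop over a running pile n that checks n % sailors == 1 and advances with q = (n-1)//sailors, n = q*(sailors-1), then a single final divisibility check when the countdown reaches 0.
import Mathlib
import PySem

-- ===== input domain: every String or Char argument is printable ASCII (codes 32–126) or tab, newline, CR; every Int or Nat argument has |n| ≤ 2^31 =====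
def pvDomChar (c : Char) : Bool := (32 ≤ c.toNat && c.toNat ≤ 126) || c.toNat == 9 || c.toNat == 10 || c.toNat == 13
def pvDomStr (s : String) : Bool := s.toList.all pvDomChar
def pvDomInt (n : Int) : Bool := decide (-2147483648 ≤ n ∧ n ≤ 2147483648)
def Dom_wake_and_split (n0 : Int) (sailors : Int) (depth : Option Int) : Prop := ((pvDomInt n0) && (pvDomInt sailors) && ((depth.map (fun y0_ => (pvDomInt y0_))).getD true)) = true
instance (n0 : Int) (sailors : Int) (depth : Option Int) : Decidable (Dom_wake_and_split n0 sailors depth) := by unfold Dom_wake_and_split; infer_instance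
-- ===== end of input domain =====

-- B replaces A's self-recursion (divmod pair, pile rebuilt as n - portion - remainder, value
-- returned through the recursive call) by an iterative countdown loop over a running pile n
-- that checks n % sailors == 1 and advances with q = (n-1)//sailors, n = q*(sailors-1).
-- Both ports carry a fuel guard (n0.toNat + 1 steps always suffice: the pile strictly
-- decreases and stays positive on every recursing step); neither changes the computed value.

-- ===== PORT A =====
def wakeA : Nat → Int → Int → Int → Option Int
  | 0, _, _, _ => none   -- fuel guard, never reached
  | fuel + 1, n0, sailors, d =>
    let portion := PySem.Int.floordiv n0 sailors
    let remainder := PySem.Int.mod n0 sailors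
    if portion ≤ 0 ∨ remainder ≠ (if d ≠ 0 then 1 else 0) then none
    else if d = 0 then some n0
    else wakeA fuel (n0 - portion - remainder) sailors (d - 1)

def wake_and_split (n0 : Int) (sailors : Int) (depth : Option Int) : Option Int :=
  wakeA (n0.toNat + 1) n0 sailors
    (match depth with | none => sailors | some v => v)   -- if depth is None: depth = sailors

-- ===== PORT B =====
-- the while-loop of Source B: running pile n, countdown d
def wakeLoop : Nat → Int → Int → Int → Option Int
  | 0, _, _, _ => none   -- fuel guard, never reached
  | fuel + 1, n, s, d =>
    if d ≠ 0 then
      if PySem.Int.mod n s ≠ 1 then none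
      else
        let q := PySem.Int.floordiv (n - 1) s
        if q ≤ 0 then none
        else wakeLoop fuel (q * (s - 1)) s (d - 1)
    else
      if PySem.Int.mod n s = 0 ∧ 0 < PySem.Int.floordiv n s then some n else none

def wake_and_split_alt (n0 : Int) (sailors : Int) (depth : Option Int) : Option Int :=
  wakeLoop (n0.toNat + 1) n0 sailors
    (match depth with | none => sailors | some v => v)

-- ===== PRECONDITION & SPEC =====
-- Pre_ excludes sailors = 0, on which the Python A raises ZeroDivisionError (divmod by zero).
def Pre_wake_and_split (n0 : Int) (sailors : Int) (depth : Option Int) : Prop := sailors ≠ 0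
instance (n0 : Int) (sailors : Int) (depth : Option Int) : Decidable (Pre_wake_and_split n0 sailors depth) := by unfold Pre_wake_and_split; infer_instance
def pvWitness_wake_and_split : Int × Int × Option Int := (3121, 5, none)

def Spec_wake_and_split (n0 : Int) (sailors : Int) (depth : Option Int) (out : Option Int) : Prop := out = wake_and_split_alt n0 sailors depth
instance (n0 : Int) (sailors : Int) (depth : Option Int) (out : Option Int) : Decidable (Spec_wake_and_split n0 sailors depth out) := by unfold Spec_wake_and_split; infer_instance

-- ===== CLAIM (what is proved, stated in full; the proofs are below) =====
def Claim_equal_wake_and_split : Prop := ∀ (n0 : Int) (sailors : Int) (depth : Option Int), Dom_wake_and_split n0 sailors depth → Pre_wake_and_split n0 sailors depth → Spec_wake_and_split n0 sailors depth (wake_and_split n0 sailors depth)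

-- ===== LEMMAS AND PROOFS =====

-- the two step functions agree at equal fuel, by induction on the fuel
theorem pv_key (s : Int) (hs : s ≠ 0) : ∀ (fuel : Nat) (n d : Int),
    wakeA fuel n s d = wakeLoop fuel n s d := by
  intro fuel
  induction fuel with
  | zero => intro n d; rfl
  | succ fuel IH =>
    intro n d
    rw [wakeA, wakeLoop]
    dsimp only
    have hid := PySem.Int.floordiv_mul_add_mod n s
    set p := PySem.Int.floordiv n s with hp
    set r := PySem.Int.mod n s with hr
    by_cases hd : d = 0
    · subst hd
      simp only [ne_eq, not_true_eq_false, if_false, ite_true]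
      by_cases hc : r = 0 ∧ 0 < p
      · rw [if_neg (by omega), if_pos hc]
      · rw [if_pos (by omega), if_neg hc]
    · have hd' : d ≠ 0 := hd
      simp only [if_pos hd']
      by_cases hr1 : r = 1
      · -- a successful step forces a positive divisor
        have hspos : 0 < s := by
          rcases lt_trichotomy s 0 with h | h | h
          · have := (PySem.Int.mod_neg_bounds (a := n) h).2; omega
          · exact absurd h hs
          · exact h
        have hq : PySem.Int.floordiv (n - 1) s = p := by
          rw [(PySem.Int.floordiv_eq_iff_of_pos hspos)]
          constructor
          · nlinarith
          · nlinarith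
        rw [hq]
        by_cases hple : p ≤ 0
        · rw [if_pos (by omega), if_neg (by omega), if_pos hple]
        · rw [if_neg (by omega), if_neg (by omega), if_neg hple, if_neg (show ¬ r ≠ 1 by omega)]
          have harg : n - p - r = p * (s - 1) := by
            rw [hr1] at hid ⊢; nlinarith
          rw [harg]
          exact IH (p * (s - 1)) (d - 1)
      · rw [if_pos (by omega), if_pos (by omega)]

-- ===== VERDICT (by name: the statement is the Claim_ definition above) =====
theorem wake_and_split_spec : Claim_equal_wake_and_split := by
  intro n0 sailors depth _ hpre
  unfold Spec_wake_and_split wake_and_split wake_and_split_alt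
  exact pv_key sailors hpre (n0.toNat + 1) n0 _
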